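-- pv_equiv track=rewrite | github.com/radam9/CPB-Selfmade-Code | 03 Functions and Methods/L5E4_Function_Practice_Exercises.py | func10_1
-- ===== SOURCE A (Python) =====
-- def func10_1(array):
--     tot = 0
--     x = True
--     for i in array:
--         while x:
--             if i != 6:
--                 tot += i
--                 break
--             else:
--                 x = False
--         while not x:
--             if i != 9:
--                 break
--             else:
--                 x = True
--                 break
--     return tot
-- ===== SOURCE B (Python) =====
-- def func10_1(array):
--     total = 0
--     i = 0
--     n = len(array)
--     while i < n:
--         if array[i] == 6:
--             i += 1
--             while i < n and array[i] != 9: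
--                 i += 1
--             i += 1  # skip the terminating 9 (or run off the end)
--         else:
--             total += array[i]
--             i += 1
--     return total
-- ===== Notes on version B (the rewrite author's own statement) =====
-- stated objective: alternative
-- what changed: Replaces A's per-element boolean-flag state machine (for-loop with two inner whiles toggling x) by a delimiter-scan: an index walk that sums elements, and on a 6 runs an inner scan forward past the next 9 before resuming.
import Mathlib
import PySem

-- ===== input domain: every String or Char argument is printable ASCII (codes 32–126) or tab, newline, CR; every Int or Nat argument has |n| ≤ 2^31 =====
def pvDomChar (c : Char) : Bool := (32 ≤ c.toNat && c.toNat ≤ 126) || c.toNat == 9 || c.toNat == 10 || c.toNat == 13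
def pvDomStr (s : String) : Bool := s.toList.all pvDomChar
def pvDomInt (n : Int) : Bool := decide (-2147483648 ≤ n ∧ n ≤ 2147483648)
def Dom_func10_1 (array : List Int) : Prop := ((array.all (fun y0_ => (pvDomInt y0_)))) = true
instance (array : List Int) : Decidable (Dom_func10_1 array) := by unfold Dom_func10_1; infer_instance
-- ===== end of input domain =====

-- ===== PORT A =====

-- B replaces A's per-element flag state machine by a delimiter-scan (skip-to-next-9 on seeing 6); same cost, different decomposition.
-- ===== PORT A =====
-- one iteration of the 'while x' loop (it either breaks or sets x := False, after which the condition fails),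
-- then one iteration of the 'while not x' loop (every branch breaks)
def pvStepA (s : Int × Bool) (i : Int) : Int × Bool :=
  let s1 := if s.2 then (if i ≠ 6 then (s.1 + i, s.2) else (s.1, false)) else s
  let x2 := if !s1.2 then (if i ≠ 9 then s1.2 else true) else s1.2
  (s1.1, x2)

def func10_1 (array : List Int) : Int := (array.foldl pvStepA (0, true)).1

-- ===== PORT B =====
-- inner while of Source B: advance past elements until (and including) the next 9
def pvSkipTo9 : List Int → List Int
  | [] => []
  | a :: rest => if a == 9 then rest else pvSkipTo9 rest

theorem pvSkipTo9_length_le : ∀ (l : List Int), (pvSkipTo9 l).length ≤ l.length := by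
  intro l; induction l with
  | nil => simp [pvSkipTo9]
  | cons a rest ih =>
    simp only [pvSkipTo9]
    split
    · simp
    · exact le_trans ih (by simp)

-- outer index loop of Source B, as structural recursion on the remaining list
def pvSumB : List Int → Int
  | [] => 0
  | a :: rest =>
    if a == 6 then pvSumB (pvSkipTo9 rest) else a + pvSumB rest
termination_by l => l.length
decreasing_by · exact Nat.lt_succ_of_le (pvSkipTo9_length_le rest)
              · simp

def func10_1_alt (array : List Int) : Int := pvSumB array

-- ===== PRECONDITION & SPEC =====
def Spec_func10_1 (array : List Int) (out : Int) : Prop := out = func10_1_alt array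
instance (array : List Int) (out : Int) : Decidable (Spec_func10_1 array out) := by unfold Spec_func10_1; infer_instance

-- ===== CLAIM (what is proved, stated in full; the proofs are below) =====
def Claim_equal_func10_1 : Prop := ∀ (array : List Int), Dom_func10_1 array → Spec_func10_1 array (func10_1 array)

-- ===== LEMMAS AND PROOFS =====
theorem pvFold_eq : ∀ (l : List Int) (tot : Int),
    ((l.foldl pvStepA (tot, true)).1 = tot + pvSumB l) ∧
    ((l.foldl pvStepA (tot, false)).1 = tot + pvSumB (pvSkipTo9 l)) := by
  intro l
  induction l with
  | nil => intro tot; simp [pvSumB, pvSkipTo9]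
  | cons a rest ih =>
    intro tot
    refine ⟨?_, ?_⟩
    · by_cases h : a = 6
      · subst h; simpa [List.foldl, pvStepA, pvSumB] using (ih tot).2
      · have h1 := (ih (tot + a)).1
        simp [List.foldl, pvStepA, pvSumB, h, h1]; ring
    · by_cases h : a = 9
      · subst h; simpa [List.foldl, pvStepA, pvSkipTo9] using (ih tot).1
      · simpa [List.foldl, pvStepA, pvSkipTo9, h] using (ih tot).2

-- ===== VERDICT (by name: the statement is the Claim_ definition above) =====
theorem func10_1_spec : Claim_equal_func10_1 := by
  intro array _
  unfold Spec_func10_1 func10_1 func10_1_alt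
  simpa using (pvFold_eq array 0).1
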